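-- pv_equiv track=rewrite | github.com/infinitin/the_poetry_plagiarist | shayar/analyse/detectors/basic_structure.py | count_repeated_lines
-- ===== SOURCE A (Python) =====
-- from collections import Counter
--
-- def count_repeated_lines(poem):
--     non_unique_lines = [x for x, y in Counter(poem).items() if y > 1]
--     if not non_unique_lines:
--         return {}
--
--     repeated_lines = {}
--     for line in non_unique_lines:
--         repeated_lines[line] = [i for i, x in enumerate(poem) if x == line]
--
--     return repeated_lines
-- ===== SOURCE B (Python) =====
-- from collections import defaultdict
--
-- def count_repeated_lines(poem):
--     positions = defaultdict(list)
--     for i, line in enumerate(poem):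
--         positions[line].append(i)
--     return {line: idxs for line, idxs in positions.items() if len(idxs) > 1}
-- ===== Notes on version B (the rewrite author's own statement) =====
-- stated objective: faster
-- what changed: Replaces the Counter pass plus one full re-scan of the poem per repeated line with a single enumerate pass that groups indices into a defaultdict, then one filter over the groups.
import Mathlib
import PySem

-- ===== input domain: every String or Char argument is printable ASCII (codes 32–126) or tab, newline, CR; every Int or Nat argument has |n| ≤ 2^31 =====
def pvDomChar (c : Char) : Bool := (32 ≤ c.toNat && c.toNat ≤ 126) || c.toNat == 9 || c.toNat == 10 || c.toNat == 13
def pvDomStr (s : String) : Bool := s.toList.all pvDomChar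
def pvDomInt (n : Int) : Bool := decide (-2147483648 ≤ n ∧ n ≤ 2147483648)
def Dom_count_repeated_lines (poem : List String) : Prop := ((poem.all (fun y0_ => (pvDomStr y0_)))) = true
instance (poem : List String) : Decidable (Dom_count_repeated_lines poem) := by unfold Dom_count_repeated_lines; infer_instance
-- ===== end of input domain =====

-- B replaces the per-repeated-line rescans of the poem with one grouping pass over enumerate(poem); objective: faster (asymptotic).
-- ===== PORT A =====
def count_repeated_lines (poem : List String) : List (String × List Int) :=
  let non_unique_lines :=
    (((PySem.Dict.counter poem).items.filter (fun p => p.2 > 1)).map Prod.fst)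
  if non_unique_lines = [] then []
  else
    (non_unique_lines.foldl
      (fun repeated_lines line =>
        repeated_lines.insert line
          (((PySem.List.enumerate poem 0).filter (fun p => p.2 == line)).map (·.1)))
      PySem.Dict.empty).items

-- ===== PORT B =====
def count_repeated_lines_alt (poem : List String) : List (String × List Int) :=
  let positions :=
    (PySem.List.enumerate poem 0).foldl
      (fun d p => d.modify p.2 [] (· ++ [p.1])) PySem.Dict.empty
  positions.items.filter (fun p => p.2.length > 1)

-- ===== PRECONDITION & SPEC =====
def Spec_count_repeated_lines (poem : List String) (out : List (String × List Int)) : Prop := out = count_repeated_lines_alt poem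
instance (poem : List String) (out : List (String × List Int)) : Decidable (Spec_count_repeated_lines poem out) := by unfold Spec_count_repeated_lines; infer_instance

-- ===== CLAIM (what is proved, stated in full; the proofs are below) =====
def Claim_equal_count_repeated_lines : Prop := ∀ (poem : List String), Dom_count_repeated_lines poem → Spec_count_repeated_lines poem (count_repeated_lines poem)

-- ===== LEMMAS AND PROOFS =====

-- the index list both programs attach to a line
def idxOf (poem : List String) (line : String) : List Int :=
  ((PySem.List.enumerate poem 0).filter (fun p => p.2 == line)).map (·.1)

theorem idxOf_length (poem : List String) (line : String) :
    (idxOf poem line).length = poem.count line := by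
  rw [idxOf, List.length_map, ← List.countP_eq_length_filter,
      show (fun (p : Int × String) => p.2 == line) = ((· == line) ∘ (·.2)) from rfl,
      ← List.countP_map, PySem.List.map_snd_enumerate, List.count]

theorem alt_eq (poem : List String) :
    count_repeated_lines_alt poem
      = ((PySem.Set.ofList poem).filter (fun k => (idxOf poem k).length > 1)).map
          (fun k => (k, idxOf poem k)) := by
  have hkeys : ((PySem.List.enumerate poem 0).foldl
      (fun d p => d.modify p.2 [] (· ++ [p.1])) PySem.Dict.empty).keys
      = PySem.Set.ofList poem := by
    rw [PySem.Dict.keys_foldl_modify_key]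
    simp [PySem.List.map_snd_enumerate, PySem.Set.update_nil_left]
  have hnd : ((PySem.List.enumerate poem 0).foldl
      (fun d p => d.modify p.2 [] (· ++ [p.1])) PySem.Dict.empty).keys.Nodup := by
    rw [hkeys]; exact PySem.Set.nodup_ofList poem
  have hget : ∀ line, ((PySem.List.enumerate poem 0).foldl
      (fun d p => d.modify p.2 [] (· ++ [p.1])) PySem.Dict.empty).getD line []
      = idxOf poem line := by
    intro line
    rw [show (PySem.List.enumerate poem 0).foldl
        (fun d p => d.modify p.2 [] (· ++ [p.1])) PySem.Dict.empty
      = ((PySem.List.enumerate poem 0).map Prod.swap).foldl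
        (fun (d : PySem.Dict String (List Int)) p => d.modify p.1 [] (· ++ [p.2]))
        PySem.Dict.empty from by rw [List.foldl_map]; rfl]
    rw [PySem.Dict.getD_foldl_modify_append]
    simp [idxOf, List.filter_map, Function.comp_def, Prod.swap]
  simp only [count_repeated_lines_alt]
  rw [PySem.Dict.items_eq_map_keys _ hnd [], hkeys, List.filter_map]
  simp only [Function.comp_def, hget]

theorem a_eq (poem : List String) :
    count_repeated_lines poem
      = ((PySem.Set.ofList poem).filter (fun k => decide ((poem.count k : Int) > 1))).map
          (fun k => (k, idxOf poem k)) := by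
  have hnu : (((PySem.Dict.counter poem).items.filter (fun p => p.2 > 1)).map Prod.fst)
      = (PySem.Set.ofList poem).filter (fun k => decide ((poem.count k : Int) > 1)) := by
    rw [PySem.Dict.items_counter, List.filter_map, List.map_map]
    simp [Function.comp_def]
  simp only [count_repeated_lines]
  simp only [hnu]
  split_ifs with h
  · rw [h]; rfl
  · have hfold := PySem.Dict.items_foldl_insert_fresh
      ((PySem.Set.ofList poem).filter (fun k => decide ((poem.count k : Int) > 1)))
      (fun line => line) (fun line => idxOf poem line) PySem.Dict.empty
      (fun a _ => by simp [pysem])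
      (by simpa using (PySem.Set.nodup_ofList poem).filter _)
    simpa [idxOf] using hfold

-- ===== VERDICT (by name: the statement is the Claim_ definition above) =====
theorem count_repeated_lines_spec : Claim_equal_count_repeated_lines := by
  intro poem _
  unfold Spec_count_repeated_lines
  rw [a_eq, alt_eq]
  refine congrArg (List.map _) (List.filter_congr ?_)
  intro k _
  rw [idxOf_length]
  simp only [decide_eq_decide]
  omega
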